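-- pv_equiv track=rewrite | github.com/MarkusSteinbrecher/insight | insight/collector/pdf.py | _merge_nearby_rects
-- ===== SOURCE A (Python) =====
-- def _merge_nearby_rects(rects: list[tuple], gap: int = 10) -> list[tuple]:
--     """Merge rectangles that overlap or are within gap pixels of each other.
--
--     Uses union-find to cluster nearby rectangles, then returns
--     the bounding box of each cluster.
--
--     Args:
--         rects: list of (x0, y0, x1, y1) tuples
--         gap: maximum pixel distance to consider rects as belonging together
--
--     Returns: list of merged (x0, y0, x1, y1) bounding boxes
--     """
--     if not rects:
--         return []
--
--     n = len(rects)
--     parent = list(range(n))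
--
--     def find(i):
--         while parent[i] != i:
--             parent[i] = parent[parent[i]]
--             i = parent[i]
--         return i
--
--     def union(i, j):
--         ri, rj = find(i), find(j)
--         if ri != rj:
--             parent[ri] = rj
--
--     for i in range(n):
--         ax0, ay0, ax1, ay1 = rects[i]
--         for j in range(i + 1, n):
--             bx0, by0, bx1, by1 = rects[j]
--             if (ax0 - gap <= bx1 and ax1 + gap >= bx0
--                     and ay0 - gap <= by1 and ay1 + gap >= by0):
--                 union(i, j)
--
--     groups: dict[int, list[tuple]] = {}
--     for i in range(n):
--         g = find(i)
--         if g not in groups: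
--             groups[g] = []
--         groups[g].append(rects[i])
--
--     return [
--         (min(r[0] for r in g), min(r[1] for r in g),
--          max(r[2] for r in g), max(r[3] for r in g))
--         for g in groups.values()
--     ]
-- ===== SOURCE B (Python) =====
-- def _merge_nearby_rects(rects: list[tuple], gap: int = 10) -> list[tuple]:
--     """Merge rectangles that overlap or are within gap pixels of each other.
--
--     Label propagation: every rectangle's label converges to the smallest
--     index in its connected component; then one pass emits each component's
--     bounding box at its representative (smallest) index.
--     """
--     n = len(rects)
--     edges = [
--         (i, j)
--         for i in range(n)
--         for j in range(i + 1, n)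
--         if (rects[i][0] - gap <= rects[j][2] and rects[i][2] + gap >= rects[j][0]
--             and rects[i][1] - gap <= rects[j][3] and rects[i][3] + gap >= rects[j][1])
--     ]
--     lab = list(range(n))
--     changed = True
--     while changed:
--         changed = False
--         for i, j in edges:
--             a, b = lab[i], lab[j]
--             if a < b:
--                 lab[j] = a
--                 changed = True
--             elif b < a:
--                 lab[i] = b
--                 changed = True
--     out = []
--     for i in range(n):
--         if lab[i] != i:
--             continue
--         x0, y0, x1, y1 = rects[i]
--         for j in range(i + 1, n):
--             if lab[j] == i:
--                 a, b, c, d = rects[j]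
--                 x0 = min(x0, a); y0 = min(y0, b)
--                 x1 = max(x1, c); y1 = max(y1, d)
--         out.append((x0, y0, x1, y1))
--     return out
-- ===== Notes on version B (the rewrite author's own statement) =====
-- stated objective: alternative
-- what changed: Replaces A's path-halving union-find plus dict regrouping with minimum-label propagation to a fixpoint over a precomputed edge list: each rectangle's label converges to the smallest index of its connected component, and one pass emits each component's bounding box at its representative index.
import Mathlib
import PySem

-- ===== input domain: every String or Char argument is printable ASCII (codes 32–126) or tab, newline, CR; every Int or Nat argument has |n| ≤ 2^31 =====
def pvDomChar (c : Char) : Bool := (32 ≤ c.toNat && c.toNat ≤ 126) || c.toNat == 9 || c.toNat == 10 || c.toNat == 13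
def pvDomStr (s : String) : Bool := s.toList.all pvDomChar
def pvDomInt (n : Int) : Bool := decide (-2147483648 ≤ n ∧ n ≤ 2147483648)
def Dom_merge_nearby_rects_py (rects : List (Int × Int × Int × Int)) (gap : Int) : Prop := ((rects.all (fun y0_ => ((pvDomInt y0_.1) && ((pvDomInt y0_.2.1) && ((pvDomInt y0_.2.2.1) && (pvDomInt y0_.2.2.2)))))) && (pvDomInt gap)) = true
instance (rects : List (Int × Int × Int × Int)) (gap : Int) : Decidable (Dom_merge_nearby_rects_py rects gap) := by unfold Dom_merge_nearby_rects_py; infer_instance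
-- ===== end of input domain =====

-- B replaces A's path-halving union-find + dict regrouping by minimum-label propagation to a
-- fixpoint over a precomputed proximity-edge list (objective: alternative algorithm, same result).

-- shared by both ports: rects[i] (index always in range in both Pythons) and the inline proximity test
def pvGetR (rects : List (Int × Int × Int × Int)) (i : Nat) : Int × Int × Int × Int :=
  rects.getD i (0, 0, 0, 0)

def pvClose (a b : Int × Int × Int × Int) (gap : Int) : Bool :=
  decide (a.1 - gap ≤ b.2.2.1 ∧ a.2.2.1 + gap ≥ b.1 ∧ a.2.1 - gap ≤ b.2.2.2 ∧ a.2.2.2 + gap ≥ b.2.1)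

-- ===== PORT A =====
-- the body of A's final list comprehension: (min(r[0]…), min(r[1]…), max(r[2]…), max(r[3]…))
-- (groups are always nonempty; Python's min/max on ints is the running fold from the first element)
def pvBBoxA (grp : List (Int × Int × Int × Int)) : Int × Int × Int × Int :=
  match grp with
  | [] => (0, 0, 0, 0)  -- unreachable: every group is nonempty
  | r :: rs =>
    (rs.foldl (fun m r => min m r.1) r.1,
     rs.foldl (fun m r => min m r.2.1) r.2.1,
     rs.foldl (fun m r => max m r.2.2.1) r.2.2.1,
     rs.foldl (fun m r => max m r.2.2.2) r.2.2.2)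

-- Python's `parent` list; the unbounded `while parent[i] != i` loop carries fuel n,
-- which is provably sufficient (pvFindAuxF_spec / pvFindL_sim below); behaviour is unchanged.
-- parent[k] is parent.getD k 0 (every access in both loops is in range).
def pvFindAux (parent : List Nat) (i : Nat) : Nat → (List Nat × Nat)
  | 0 => (parent, i)
  | fuel+1 =>
    if parent.getD i 0 = i then (parent, i)
    else
      let parent' := parent.set i (parent.getD (parent.getD i 0) 0)
      pvFindAux parent' (parent'.getD i 0) fuel

def pvFind (n : Nat) (parent : List Nat) (i : Nat) : List Nat × Nat := pvFindAux parent i n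

def pvUnion (n : Nat) (parent : List Nat) (i j : Nat) : List Nat :=
  let fi := pvFind n parent i
  let fj := pvFind n fi.1 j
  if fi.2 ≠ fj.2 then fj.1.set fi.2 fj.2 else fj.1

def merge_nearby_rects_py (rects : List (Int × Int × Int × Int)) (gap : Int) : List (Int × Int × Int × Int) :=
  match rects with
  | [] => []
  | _ :: _ =>
    let n := rects.length
    let parent0 := List.range n
    let parent1 := (List.range n).foldl (fun parent i =>
        (List.range' (i+1) (n - (i+1))).foldl (fun parent j =>
            if pvClose (pvGetR rects i) (pvGetR rects j) gap then pvUnion n parent i j else parent)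
          parent) parent0
    let s := (List.range n).foldl
        (fun (s : List Nat × PySem.Dict Nat (List (Int × Int × Int × Int))) i =>
          let f := pvFind n s.1 i
          let g := f.2
          let d := if (s.2.get? g).isNone then s.2.insert g [] else s.2
          (f.1, d.modify g [] (fun l => l ++ [pvGetR rects i])))
        (parent1, PySem.Dict.empty)
    s.2.values.map pvBBoxA

-- ===== PORT B =====
-- Source B's `lab` list is likewise modelled as a function on indices.
def pvEdges (rects : List (Int × Int × Int × Int)) (gap : Int) : List (Nat × Nat) :=
  let n := rects.length
  (List.range n).flatMap (fun i =>
    ((List.range' (i+1) (n - (i+1))).filter (fun j => pvClose (pvGetR rects i) (pvGetR rects j) gap)).map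
      (fun j => (i, j)))

theorem pvEdges_lt (rects : List (Int × Int × Int × Int)) (gap : Int) :
    ∀ p ∈ pvEdges rects gap, p.1 < rects.length ∧ p.2 < rects.length := by
  intro p hp
  simp only [pvEdges, List.mem_flatMap, List.mem_map, List.mem_filter, List.mem_range,
    List.mem_range'_1] at hp
  obtain ⟨i, hi, j, ⟨⟨hj1, hj2⟩, _⟩, rfl⟩ := hp
  omega

-- one body of Source B's inner `for (i, j) in edges` loop
def pvStep (s : (Nat → Nat) × Bool) (e : Nat × Nat) : (Nat → Nat) × Bool :=
  let a := s.1 e.1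
  let b := s.1 e.2
  if a < b then (Function.update s.1 e.2 a, true)
  else if b < a then (Function.update s.1 e.1 b, true)
  else s

theorem pvStep_le (s : (Nat → Nat) × Bool) (e : Nat × Nat) : ∀ x, (pvStep s e).1 x ≤ s.1 x := by
  intro x
  unfold pvStep
  dsimp only
  split_ifs with h1 h2
  · simp only [Function.update_apply]
    split_ifs with hx
    · rw [hx]; omega
    · exact le_refl _
  · simp only [Function.update_apply]
    split_ifs with hx
    · rw [hx]; omega
    · exact le_refl _
  · exact le_refl _

theorem pvStepFold_le (es : List (Nat × Nat)) (s : (Nat → Nat) × Bool) :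
    ∀ x, (es.foldl pvStep s).1 x ≤ s.1 x := by
  induction es generalizing s with
  | nil => intro x; exact le_refl _
  | cons e es ih =>
    intro x
    exact le_trans (ih (pvStep s e) x) (pvStep_le s e x)

-- one round of Source B's while-loop body
def pvRound (edges : List (Nat × Nat)) (lab : Nat → Nat) : (Nat → Nat) × Bool :=
  edges.foldl pvStep (lab, false)

theorem pvStepFold_lt {n : Nat} (es : List (Nat × Nat)) (hE : ∀ p ∈ es, p.1 < n ∧ p.2 < n)
    (lab : Nat → Nat) (h : (pvRound es lab).2 = true) :
    ∑ i ∈ Finset.range n, (pvRound es lab).1 i < ∑ i ∈ Finset.range n, lab i := by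
  have strict : ∀ (es : List (Nat × Nat)), (∀ p ∈ es, p.1 < n ∧ p.2 < n) → ∀ lab : Nat → Nat,
      (es.foldl pvStep (lab, false)).2 = true →
      ∃ x, x < n ∧ (es.foldl pvStep (lab, false)).1 x < lab x := by
    intro es
    induction es with
    | nil => intro _ lab h; simp at h
    | cons e es ih =>
      intro hE lab h
      by_cases h1 : lab e.1 < lab e.2
      · refine ⟨e.2, (hE e (by simp)).2, ?_⟩
        have hstep : pvStep (lab, false) e = (Function.update lab e.2 (lab e.1), true) := by
          unfold pvStep; simp [h1]
        calc ((e :: es).foldl pvStep (lab, false)).1 e.2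
            ≤ (Function.update lab e.2 (lab e.1)) e.2 := by
              simpa [hstep] using
                pvStepFold_le es (Function.update lab e.2 (lab e.1), true) e.2
          _ = lab e.1 := by simp
          _ < lab e.2 := h1
      · by_cases h2 : lab e.2 < lab e.1
        · refine ⟨e.1, (hE e (by simp)).1, ?_⟩
          have hstep : pvStep (lab, false) e = (Function.update lab e.1 (lab e.2), true) := by
            unfold pvStep; simp [h1, h2]
          calc ((e :: es).foldl pvStep (lab, false)).1 e.1
              ≤ (Function.update lab e.1 (lab e.2)) e.1 := by
                simpa [hstep] using
                  pvStepFold_le es (Function.update lab e.1 (lab e.2), true) e.1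
            _ = lab e.2 := by simp
            _ < lab e.1 := h2
        · have hstep : pvStep (lab, false) e = (lab, false) := by
            unfold pvStep; simp [h1, h2]
          simp only [List.foldl_cons, hstep] at h ⊢
          exact ih (fun p hp => hE p (by simp [hp])) lab h
  obtain ⟨x, hx, hlt⟩ := strict es hE lab h
  refine Finset.sum_lt_sum (fun i _ => ?_) ⟨x, Finset.mem_range.2 hx, hlt⟩
  exact pvStepFold_le es (lab, false) i

-- Source B's `while changed` loop; terminates because every changing round strictly
-- decreases the sum of the labels (pvStepFold_lt)
def pvPropagate (n : Nat) (edges : List (Nat × Nat)) (hE : ∀ p ∈ edges, p.1 < n ∧ p.2 < n)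
    (lab : Nat → Nat) : Nat → Nat :=
  if h : (pvRound edges lab).2 = true then pvPropagate n edges hE (pvRound edges lab).1
  else (pvRound edges lab).1
termination_by ∑ i ∈ Finset.range n, lab i
decreasing_by exact pvStepFold_lt edges hE lab h

def merge_nearby_rects_py_alt (rects : List (Int × Int × Int × Int)) (gap : Int) : List (Int × Int × Int × Int) :=
  let n := rects.length
  let lab := pvPropagate n (pvEdges rects gap) (pvEdges_lt rects gap) (fun i => i)
  (List.range n).foldl (fun out i =>
    if lab i = i then
      let bb := (List.range' (i+1) (n - (i+1))).foldl (fun (s : Int × Int × Int × Int) j =>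
          if lab j = i then
            let r := pvGetR rects j
            (min s.1 r.1, min s.2.1 r.2.1, max s.2.2.1 r.2.2.1, max s.2.2.2 r.2.2.2)
          else s) (pvGetR rects i)
      out ++ [bb]
    else out) []

-- ===== PRECONDITION & SPEC =====
def Spec_merge_nearby_rects_py (rects : List (Int × Int × Int × Int)) (gap : Int) (out : List (Int × Int × Int × Int)) : Prop := out = merge_nearby_rects_py_alt rects gap
instance (rects : List (Int × Int × Int × Int)) (gap : Int) (out : List (Int × Int × Int × Int)) : Decidable (Spec_merge_nearby_rects_py rects gap out) := by unfold Spec_merge_nearby_rects_py; infer_instance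

-- ===== CLAIM (what is proved, stated in full; the proofs are below) =====
def Claim_equal_merge_nearby_rects_py : Prop := ∀ (rects : List (Int × Int × Int × Int)) (gap : Int), Dom_merge_nearby_rects_py rects gap → Spec_merge_nearby_rects_py rects gap (merge_nearby_rects_py rects gap)

-- ===== LEMMAS AND PROOFS =====

-- Python's `parent` list (length n, all reads/writes at indices < n) is modelled as a function
-- on indices; `parent[x] = v` is `Function.update`. The unbounded `while parent[i] != i` loop
-- carries fuel n, which is provably sufficient (pvFindAux_spec below); behaviour is unchanged.
def pvFindAuxF (P : Nat → Nat) (i : Nat) : Nat → ((Nat → Nat) × Nat)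
  | 0 => (P, i)
  | fuel+1 =>
    if P i = i then (P, i)
    else
      let P' := Function.update P i (P (P i))
      pvFindAuxF P' (P' i) fuel

def pvFindF (n : Nat) (P : Nat → Nat) (i : Nat) : (Nat → Nat) × Nat := pvFindAuxF P i n

def pvUnionF (n : Nat) (P : Nat → Nat) (i j : Nat) : Nat → Nat :=
  let fi := pvFindF n P i
  let fj := pvFindF n fi.1 j
  if fi.2 ≠ fj.2 then Function.update fj.1 fi.2 fj.2 else fj.1


-- `P (P^[k] x) = P^[k] x`: from x the parent chain reaches a fixpoint (root) within k steps
def pvFix (P : Nat → Nat) (k : Nat) (x : Nat) : Prop := P (P^[k] x) = P^[k] x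

-- invariant of A's parent map: identity outside [0,n), closed on [0,n), every chain reaches a root
def pvInv (n : Nat) (P : Nat → Nat) : Prop :=
  (∀ x, ¬ x < n → P x = x) ∧ (∀ i, i < n → P i < n) ∧ (∀ x, ∃ k, pvFix P k x)

-- the root of x's chain (well defined under pvInv: the chain stabilises within n steps)
def pvRoot (n : Nat) (P : Nat → Nat) (x : Nat) : Nat := P^[n] x

-- connectivity along the proximity edges (the same edge list B computes)
def pvConn (rects : List (Int × Int × Int × Int)) (gap : Int) (a b : Nat) : Prop :=
  Relation.EqvGen (fun x y => (x, y) ∈ pvEdges rects gap) a b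

theorem pvFix_mono {P : Nat → Nat} {k m x : Nat} (h : pvFix P k x) (hkm : k ≤ m) : pvFix P m x := by
  induction hkm with
  | refl => exact h
  | step _ ih =>
    unfold pvFix at ih ⊢
    rw [Function.iterate_succ_apply', ih, ih]

theorem pvFix_succ_iff {P : Nat → Nat} {k x : Nat} : pvFix P (k+1) x ↔ pvFix P k (P x) := by
  unfold pvFix
  rw [Function.iterate_succ_apply]

theorem pvFix_shift {P : Nat → Nat} {k x : Nat} (h : pvFix P k x) : pvFix P k (P x) := by
  unfold pvFix at h ⊢
  rw [← Function.iterate_succ_apply, Function.iterate_succ_apply', h]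
  exact h

theorem pvIter_lt {n : Nat} {P : Nat → Nat} (hb : ∀ i, i < n → P i < n) {x : Nat} (hx : x < n) :
    ∀ k, P^[k] x < n := by
  intro k
  induction k with
  | zero => simpa using hx
  | succ k ih => rw [Function.iterate_succ_apply']; exact hb _ ih

theorem pvFix_le_n {n : Nat} {P : Nat → Nat} (hP : pvInv n P) (x : Nat) : pvFix P n x := by
  by_cases hx : x < n
  · haveI : DecidablePred (fun k => pvFix P k x) := fun k => by unfold pvFix; infer_instance
    have hex : ∃ k, pvFix P k x := hP.2.2 x
    set d := Nat.find hex with hd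
    have hfixd : pvFix P d x := Nat.find_spec hex
    have hmin : ∀ m, m < d → ¬ pvFix P m x := fun m hm => Nat.find_min hex hm
    rcases Nat.lt_or_ge n d with hnd | hnd
    swap
    · exact pvFix_mono hfixd hnd
    · -- pigeonhole: the d+1 nodes x, P x, …, P^[d] x are distinct and all < n
      exfalso
      have hinj : Function.Injective (fun k : Fin (d+1) => (⟨P^[(k : Nat)] x, pvIter_lt hP.2.1 hx _⟩ : Fin n)) := by
        intro k1 k2 heq
        simp only [Fin.mk.injEq] at heq
        by_contra hne
        -- wlog k1 < k2
        have key : ∀ a b : Fin (d+1), (a : Nat) < (b : Nat) → P^[(a : Nat)] x = P^[(b : Nat)] x → False := by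
          intro a b hab hEq
          have hfix2 : pvFix P (d - (b : Nat)) (P^[(b : Nat)] x) := by
            unfold pvFix
            rw [← Function.iterate_add_apply]
            have hdb : d - (b : Nat) + (b : Nat) = d := Nat.sub_add_cancel (Nat.le_of_lt_succ b.2)
            rw [hdb]
            exact hfixd
          rw [← hEq] at hfix2
          have hfix1 : pvFix P ((d - (b : Nat)) + (a : Nat)) x := by
            unfold pvFix at hfix2 ⊢
            rw [Function.iterate_add_apply]
            exact hfix2
          have hb2 : (b : Nat) ≤ d := Nat.le_of_lt_succ b.2
          exact hmin _ (by omega) hfix1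
        rcases Nat.lt_or_ge (k1 : Nat) (k2 : Nat) with hlt | hge
        · exact key k1 k2 hlt heq
        · rcases Nat.lt_or_ge (k2 : Nat) (k1 : Nat) with hlt' | hge'
          · exact key k2 k1 hlt' heq.symm
          · exact hne (Fin.ext (by omega))
      have := Fintype.card_le_of_injective _ hinj
      simp [Fintype.card_fin] at this
      omega
  · have h0 : pvFix P 0 x := by unfold pvFix; simpa using hP.1 x hx
    exact pvFix_mono h0 (Nat.zero_le n)

theorem pvRoot_fix {n : Nat} {P : Nat → Nat} (hP : pvInv n P) (x : Nat) :
    P (pvRoot n P x) = pvRoot n P x := pvFix_le_n hP x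

theorem pvRoot_step {n : Nat} {P : Nat → Nat} (hP : pvInv n P) (x : Nat) :
    pvRoot n P (P x) = pvRoot n P x := by
  unfold pvRoot
  rw [← Function.iterate_succ_apply, Function.iterate_succ_apply']
  exact pvRoot_fix hP x

theorem pvRoot_of_fix {n : Nat} {P : Nat → Nat} {x : Nat} (h : P x = x) : pvRoot n P x = x :=
  Function.iterate_fixed h n

theorem pvRoot_lt {n : Nat} {P : Nat → Nat} (hP : pvInv n P) {x : Nat} (hx : x < n) :
    pvRoot n P x < n := pvIter_lt hP.2.1 hx n

theorem pvRoot_id (n x : Nat) : pvRoot n (fun i => i) x = x := by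
  unfold pvRoot
  rw [show (fun i : Nat => i) = id from rfl, Function.iterate_id]
  rfl

theorem pvInv_id (n : Nat) : pvInv n (fun i => i) :=
  ⟨fun _ _ => rfl, fun i hi => hi, fun x => ⟨0, rfl⟩⟩

-- path halving `parent[i] = parent[parent[i]]` preserves the invariant and every root
theorem pvFix_half {n : Nat} {P : Nat → Nat} (hP : pvInv n P) {i : Nat} (hi : P i ≠ i) :
    ∀ k x, pvFix P k x → pvFix (Function.update P i (P (P i))) k x := by
  intro k
  induction k with
  | zero =>
    intro x h
    have hxi : x ≠ i := fun hxi => hi (hxi ▸ h)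
    unfold pvFix at h ⊢
    simpa [Function.update_of_ne hxi] using h
  | succ k ih =>
    intro x h
    by_cases hfx : P x = x
    · have h0 : pvFix (Function.update P i (P (P i))) 0 x := by
        have hxi : x ≠ i := fun hxi => hi (hxi ▸ hfx)
        unfold pvFix
        simpa [Function.update_of_ne hxi] using hfx
      exact pvFix_mono h0 (Nat.zero_le _)
    · by_cases hxi : x = i
      · subst hxi
        have h2 : pvFix P k (P (P x)) := pvFix_shift (pvFix_succ_iff.1 h)
        have h3 := ih _ h2
        rw [pvFix_succ_iff, Function.update_self]
        exact h3
      · have h2 : pvFix P k (P x) := pvFix_succ_iff.1 h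
        have h3 := ih _ h2
        rw [pvFix_succ_iff, Function.update_of_ne hxi]
        exact h3

theorem pvInv_half {n : Nat} {P : Nat → Nat} (hP : pvInv n P) {i : Nat} (hi : P i ≠ i) :
    pvInv n (Function.update P i (P (P i))) := by
  have hiN : i < n := by
    by_contra hiN
    exact hi (hP.1 i hiN)
  refine ⟨?_, ?_, ?_⟩
  · intro x hx
    rw [Function.update_of_ne (fun hxi => hx (by rw [hxi]; exact hiN))]
    exact hP.1 x hx
  · intro x hx
    by_cases hxi : x = i
    · subst hxi
      rw [Function.update_self]
      exact hP.2.1 _ (hP.2.1 _ hiN)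
    · rw [Function.update_of_ne hxi]
      exact hP.2.1 _ hx
  · intro x
    obtain ⟨k, hk⟩ := hP.2.2 x
    exact ⟨k, pvFix_half hP hi k x hk⟩

theorem pvRoot_half {n : Nat} {P : Nat → Nat} (hP : pvInv n P) {i : Nat} (hi : P i ≠ i) :
    ∀ x, pvRoot n (Function.update P i (P (P i))) x = pvRoot n P x := by
  have hQ : pvInv n (Function.update P i (P (P i))) := pvInv_half hP hi
  have main : ∀ k x, pvFix P k x → pvRoot n (Function.update P i (P (P i))) x = pvRoot n P x := by
    intro k
    induction k with
    | zero =>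
      intro x h
      have hfx : P x = x := by simpa [pvFix] using h
      have hxi : x ≠ i := fun hxi => hi (hxi ▸ hfx)
      rw [pvRoot_of_fix hfx, pvRoot_of_fix (show Function.update P i (P (P i)) x = x by
        rwa [Function.update_of_ne hxi])]
    | succ k ih =>
      intro x h
      by_cases hfx : P x = x
      · have hxi : x ≠ i := fun hxi => hi (hxi ▸ hfx)
        rw [pvRoot_of_fix hfx, pvRoot_of_fix (show Function.update P i (P (P i)) x = x by
          rwa [Function.update_of_ne hxi])]
      · by_cases hxi : x = i
        · have h2 : pvFix P k (P (P i)) := pvFix_shift (pvFix_succ_iff.1 (hxi ▸ h))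
          rw [hxi]
          calc pvRoot n (Function.update P i (P (P i))) i
              = pvRoot n (Function.update P i (P (P i))) (Function.update P i (P (P i)) i) :=
                (pvRoot_step hQ i).symm
            _ = pvRoot n (Function.update P i (P (P i))) (P (P i)) := by rw [Function.update_self]
            _ = pvRoot n P (P (P i)) := ih _ h2
            _ = pvRoot n P i := by rw [pvRoot_step hP, pvRoot_step hP]
        · have h2 : pvFix P k (P x) := pvFix_succ_iff.1 h
          calc pvRoot n (Function.update P i (P (P i))) x
              = pvRoot n (Function.update P i (P (P i))) (Function.update P i (P (P i)) x) :=
                (pvRoot_step hQ x).symm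
            _ = pvRoot n (Function.update P i (P (P i))) (P x) := by rw [Function.update_of_ne hxi]
            _ = pvRoot n P (P x) := ih _ h2
            _ = pvRoot n P x := pvRoot_step hP x
  intro x
  obtain ⟨k, hk⟩ := hP.2.2 x
  exact main k x hk

theorem pvFindAux_spec {n : Nat} :
    ∀ (fuel : Nat) (P : Nat → Nat) (i : Nat), pvInv n P → pvFix P fuel i →
      (pvFindAuxF P i fuel).2 = pvRoot n P i ∧ pvInv n (pvFindAuxF P i fuel).1 ∧
        ∀ x, pvRoot n (pvFindAuxF P i fuel).1 x = pvRoot n P x := by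
  intro fuel
  induction fuel with
  | zero =>
    intro P i hP hfix
    have hfx : P i = i := by simpa [pvFix] using hfix
    exact ⟨(pvRoot_of_fix hfx).symm, hP, fun x => rfl⟩
  | succ fuel ih =>
    intro P i hP hfix
    unfold pvFindAuxF
    by_cases hfx : P i = i
    · rw [if_pos hfx]
      exact ⟨(pvRoot_of_fix hfx).symm, hP, fun x => rfl⟩
    · rw [if_neg hfx]
      have hP' : pvInv n (Function.update P i (P (P i))) := pvInv_half hP hfx
      have hupd : Function.update P i (P (P i)) i = P (P i) := Function.update_self i (P (P i)) P
      have hfix' : pvFix (Function.update P i (P (P i))) fuel (Function.update P i (P (P i)) i) := by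
        rw [hupd]
        exact pvFix_half hP hfx _ _ (pvFix_shift (pvFix_succ_iff.1 hfix))
      obtain ⟨h1, h2, h3⟩ := ih _ _ hP' hfix'
      refine ⟨?_, h2, fun x => (h3 x).trans (pvRoot_half hP hfx x)⟩
      rw [h1, hupd, pvRoot_half hP hfx, pvRoot_step hP, pvRoot_step hP]

theorem pvFind_spec {n : Nat} {P : Nat → Nat} (hP : pvInv n P) (i : Nat) :
    (pvFindF n P i).2 = pvRoot n P i ∧ pvInv n (pvFindF n P i).1 ∧
      ∀ x, pvRoot n (pvFindF n P i).1 x = pvRoot n P x :=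
  pvFindAux_spec n P i hP (pvFix_le_n hP i)

-- linking a root `ri` under another root `rj` rewires exactly `ri`'s class
theorem pvFix_link {n : Nat} {P : Nat → Nat} (hP : pvInv n P) {ri rj : Nat}
    (hri : P ri = ri) (hrj : P rj = rj) (hne : ri ≠ rj) :
    ∀ k x, pvFix P k x → pvFix (Function.update P ri rj) (k+1) x := by
  have hroots : ∀ x, P x = x → pvFix (Function.update P ri rj) 1 x := by
    intro x hfx
    by_cases hxr : x = ri
    · rw [hxr]
      have h1 : Function.update P ri rj ri = rj := Function.update_self ri rj P
      have h2 : Function.update P ri rj rj = rj := by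
        rw [Function.update_of_ne (Ne.symm hne)]; exact hrj
      rw [pvFix_succ_iff, h1]
      unfold pvFix
      simpa using h2
    · have h1 : Function.update P ri rj x = x := by
        rw [Function.update_of_ne hxr]; exact hfx
      rw [pvFix_succ_iff, h1]
      unfold pvFix
      simpa using h1
  intro k
  induction k with
  | zero =>
    intro x h
    exact hroots x (by simpa [pvFix] using h)
  | succ k ih =>
    intro x h
    by_cases hfx : P x = x
    · exact pvFix_mono (hroots x hfx) (by omega)
    · have hxr : x ≠ ri := fun hxr => hfx (hxr ▸ hri)
      have h3 := ih _ (pvFix_succ_iff.1 h)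
      rw [pvFix_succ_iff, Function.update_of_ne hxr]
      exact h3

theorem pvInv_link {n : Nat} {P : Nat → Nat} (hP : pvInv n P) {ri rj : Nat}
    (hri : P ri = ri) (hrj : P rj = rj) (hne : ri ≠ rj) (hriN : ri < n) (hrjN : rj < n) :
    pvInv n (Function.update P ri rj) := by
  refine ⟨?_, ?_, ?_⟩
  · intro x hx
    rw [Function.update_of_ne (fun hxi => hx (by rw [hxi]; exact hriN))]
    exact hP.1 x hx
  · intro x hx
    by_cases hxr : x = ri
    · subst hxr
      rw [Function.update_self]
      exact hrjN
    · rw [Function.update_of_ne hxr]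
      exact hP.2.1 _ hx
  · intro x
    obtain ⟨k, hk⟩ := hP.2.2 x
    exact ⟨k+1, pvFix_link hP hri hrj hne k x hk⟩

theorem pvRoot_link {n : Nat} {P : Nat → Nat} (hP : pvInv n P) {ri rj : Nat}
    (hri : P ri = ri) (hrj : P rj = rj) (hne : ri ≠ rj) (hriN : ri < n) (hrjN : rj < n) :
    ∀ x, pvRoot n (Function.update P ri rj) x =
      if pvRoot n P x = ri then rj else pvRoot n P x := by
  have hQ : pvInv n (Function.update P ri rj) := pvInv_link hP hri hrj hne hriN hrjN
  have hroots : ∀ x, P x = x →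
      pvRoot n (Function.update P ri rj) x = if pvRoot n P x = ri then rj else pvRoot n P x := by
    intro x hfx
    rw [pvRoot_of_fix hfx]
    by_cases hxr : x = ri
    · rw [hxr, if_pos rfl]
      have h1 : Function.update P ri rj ri = rj := Function.update_self ri rj P
      have h2 : Function.update P ri rj rj = rj := by
        rw [Function.update_of_ne (Ne.symm hne)]; exact hrj
      rw [← pvRoot_step hQ ri, h1, pvRoot_of_fix h2]
    · rw [if_neg hxr]
      exact pvRoot_of_fix (by rw [Function.update_of_ne hxr]; exact hfx)
  have main : ∀ k x, pvFix P k x →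
      pvRoot n (Function.update P ri rj) x = if pvRoot n P x = ri then rj else pvRoot n P x := by
    intro k
    induction k with
    | zero =>
      intro x h
      exact hroots x (by simpa [pvFix] using h)
    | succ k ih =>
      intro x h
      by_cases hfx : P x = x
      · exact hroots x hfx
      · have hxr : x ≠ ri := fun hxr => hfx (hxr ▸ hri)
        have h3 := ih _ (pvFix_succ_iff.1 h)
        rw [← pvRoot_step hQ x, Function.update_of_ne hxr, h3, pvRoot_step hP]
  intro x
  obtain ⟨k, hk⟩ := hP.2.2 x
  exact main k x hk

theorem pvUnion_inv {n : Nat} {P : Nat → Nat} (hP : pvInv n P) {i j : Nat} (hi : i < n) (hj : j < n) :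
    pvInv n (pvUnionF n P i j) := by
  obtain ⟨hfi2, hfiInv, hfiRoot⟩ := pvFind_spec hP i
  obtain ⟨hfj2, hfjInv, hfjRoot⟩ := pvFind_spec hfiInv j
  unfold pvUnionF
  dsimp only
  split_ifs with hne
  · have hri : (pvFindF n (pvFindF n P i).1 j).1 (pvRoot n P i) = pvRoot n P i := by
      have := pvRoot_fix hfjInv i
      rwa [hfjRoot, hfiRoot] at this
    have hrj : (pvFindF n (pvFindF n P i).1 j).1 (pvRoot n P j) = pvRoot n P j := by
      have := pvRoot_fix hfjInv j
      rwa [hfjRoot, hfiRoot] at this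
    have hne' : pvRoot n P i ≠ pvRoot n P j := by
      rw [← hfi2]
      rw [hfj2, hfiRoot] at hne
      exact hne
    rw [hfi2, hfj2, hfiRoot]
    exact pvInv_link hfjInv hri hrj hne' (pvRoot_lt hP hi) (pvRoot_lt hP hj)
  · exact hfjInv

theorem pvUnion_root {n : Nat} {P : Nat → Nat} (hP : pvInv n P) {i j : Nat} (hi : i < n) (hj : j < n) :
    ∀ x, pvRoot n (pvUnionF n P i j) x =
      if pvRoot n P x = pvRoot n P i then pvRoot n P j else pvRoot n P x := by
  intro x
  obtain ⟨hfi2, hfiInv, hfiRoot⟩ := pvFind_spec hP i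
  obtain ⟨hfj2, hfjInv, hfjRoot⟩ := pvFind_spec hfiInv j
  have hfjP : ∀ y, pvRoot n (pvFindF n (pvFindF n P i).1 j).1 y = pvRoot n P y :=
    fun y => (hfjRoot y).trans (hfiRoot y)
  unfold pvUnionF
  dsimp only
  by_cases hne : (pvFindF n P i).2 ≠ (pvFindF n (pvFindF n P i).1 j).2
  · rw [if_pos hne]
    have hri : (pvFindF n (pvFindF n P i).1 j).1 (pvRoot n P i) = pvRoot n P i := by
      have := pvRoot_fix hfjInv i
      rwa [hfjP] at this
    have hrj : (pvFindF n (pvFindF n P i).1 j).1 (pvRoot n P j) = pvRoot n P j := by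
      have := pvRoot_fix hfjInv j
      rwa [hfjP] at this
    have hne' : pvRoot n P i ≠ pvRoot n P j := by
      rw [← hfi2]
      rw [hfj2, hfiRoot] at hne
      exact hne
    rw [hfi2, hfj2, hfiRoot]
    rw [pvRoot_link hfjInv hri hrj hne' (pvRoot_lt hP hi) (pvRoot_lt hP hj) x, hfjP]
  · rw [if_neg hne]
    have heq : pvRoot n P i = pvRoot n P j := by
      simp only [ne_eq, not_not] at hne
      rw [← hfi2, hne, hfj2, hfiRoot]
    rw [hfjP]
    split_ifs with hc
    · rw [← heq, ← hc]
    · rfl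

-- the union fold: invariant, monotonicity, completeness, soundness
theorem pvUfFold_inv {n : Nat} (es : List (Nat × Nat)) (P : Nat → Nat) (hP : pvInv n P)
    (hE : ∀ e ∈ es, e.1 < n ∧ e.2 < n) :
    pvInv n (es.foldl (fun P e => pvUnionF n P e.1 e.2) P) := by
  induction es generalizing P with
  | nil => exact hP
  | cons e es ih =>
    have he := hE e (by simp)
    exact ih _ (pvUnion_inv hP he.1 he.2) (fun e' he' => hE e' (by simp [he']))

theorem pvUfFold_mono {n : Nat} (es : List (Nat × Nat)) (P : Nat → Nat) (hP : pvInv n P)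
    (hE : ∀ e ∈ es, e.1 < n ∧ e.2 < n) {a b : Nat} (h : pvRoot n P a = pvRoot n P b) :
    pvRoot n (es.foldl (fun P e => pvUnionF n P e.1 e.2) P) a =
      pvRoot n (es.foldl (fun P e => pvUnionF n P e.1 e.2) P) b := by
  induction es generalizing P with
  | nil => exact h
  | cons e es ih =>
    have he := hE e (by simp)
    refine ih _ (pvUnion_inv hP he.1 he.2) (fun e' he' => hE e' (by simp [he'])) ?_
    rw [pvUnion_root hP he.1 he.2 a, pvUnion_root hP he.1 he.2 b, h]

theorem pvUfFold_complete {n : Nat} (es : List (Nat × Nat)) (P : Nat → Nat) (hP : pvInv n P)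
    (hE : ∀ e ∈ es, e.1 < n ∧ e.2 < n) :
    ∀ e ∈ es, pvRoot n (es.foldl (fun P e => pvUnionF n P e.1 e.2) P) e.1 =
      pvRoot n (es.foldl (fun P e => pvUnionF n P e.1 e.2) P) e.2 := by
  induction es generalizing P with
  | nil => intro e he; simp at he
  | cons e es ih =>
    have he := hE e (by simp)
    have hP' : pvInv n (pvUnionF n P e.1 e.2) := pvUnion_inv hP he.1 he.2
    have hE' : ∀ e' ∈ es, e'.1 < n ∧ e'.2 < n := fun e' he' => hE e' (by simp [he'])
    intro e' he'
    rcases List.mem_cons.1 he' with rfl | hmem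
    · simp only [List.foldl_cons]
      refine pvUfFold_mono es _ hP' hE' ?_
      rw [pvUnion_root hP he.1 he.2 e'.1, pvUnion_root hP he.1 he.2 e'.2, if_pos rfl]
      split_ifs with hc
      · rfl
      · rfl
    · simp only [List.foldl_cons]
      exact ih _ hP' hE' e' hmem

theorem pvUfFold_sound {n : Nat} (R : Nat → Nat → Prop) (hR : Equivalence R)
    (es : List (Nat × Nat)) (hsub : ∀ e ∈ es, R e.1 e.2)
    (P : Nat → Nat) (hP : pvInv n P) (hE : ∀ e ∈ es, e.1 < n ∧ e.2 < n)
    (hbase : ∀ a b, pvRoot n P a = pvRoot n P b → R a b) :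
    ∀ a b, pvRoot n (es.foldl (fun P e => pvUnionF n P e.1 e.2) P) a =
      pvRoot n (es.foldl (fun P e => pvUnionF n P e.1 e.2) P) b → R a b := by
  induction es generalizing P with
  | nil => exact hbase
  | cons e es ih =>
    have he := hE e (by simp)
    have hP' : pvInv n (pvUnionF n P e.1 e.2) := pvUnion_inv hP he.1 he.2
    have hE' : ∀ e' ∈ es, e'.1 < n ∧ e'.2 < n := fun e' he' => hE e' (by simp [he'])
    have hsub' : ∀ e' ∈ es, R e'.1 e'.2 := fun e' he' => hsub e' (by simp [he'])
    have hRe : R e.1 e.2 := hsub e (by simp)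
    intro a b hab
    refine ih hsub' _ hP' hE' ?_ a b hab
    intro a b h
    rw [pvUnion_root hP he.1 he.2 a, pvUnion_root hP he.1 he.2 b] at h
    split_ifs at h with h1 h2 h2
    · exact hR.trans (hbase a e.1 h1) (hR.symm (hbase b e.1 h2))
    · -- root a = root i, root b stays and equals root j
      exact hR.trans (hbase a e.1 h1) (hR.trans hRe (hR.symm (hbase b e.2 h.symm)))
    · exact hR.trans (hbase a e.2 h) (hR.symm (hR.trans (hbase b e.1 h2) hRe))
    · exact hbase a b h

-- A's final root function, and B's final label function
def pvRho (rects : List (Int × Int × Int × Int)) (gap : Int) : Nat → Nat :=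
  pvRoot rects.length
    ((pvEdges rects gap).foldl (fun P e => pvUnionF rects.length P e.1 e.2) (fun i => i))

def pvLab (rects : List (Int × Int × Int × Int)) (gap : Int) : Nat → Nat :=
  pvPropagate rects.length (pvEdges rects gap) (pvEdges_lt rects gap) (fun i => i)

-- A's nested union loops are the fold of the union step over the edge list B computes
theorem pvP1_eq {σ : Type} (rects : List (Int × Int × Int × Int)) (gap : Int)
    (u : σ → Nat → Nat → σ) (P0 : σ) :
    (List.range rects.length).foldl (fun P i =>
        (List.range' (i+1) (rects.length - (i+1))).foldl (fun P j =>
            if pvClose (pvGetR rects i) (pvGetR rects j) gap then u P i j else P) P) P0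
      = (pvEdges rects gap).foldl (fun P e => u P e.1 e.2) P0 := by
  unfold pvEdges
  rw [List.foldl_flatMap]
  apply PySem.List.foldl_congr_mem
  intro P i _
  rw [List.foldl_map]
  rw [PySem.List.foldl_if_eq_foldl_filter (fun j => pvClose (pvGetR rects i) (pvGetR rects j) gap)
    (fun P j => u P i j)]

-- Python's "ensure key, then append" dict update is a single modify-with-default
theorem pvDstep_eq (d : PySem.Dict Nat (List (Int × Int × Int × Int))) (g : Nat)
    (v : Int × Int × Int × Int) :
    (if (d.get? g).isNone then d.insert g [] else d).modify g [] (fun l => l ++ [v])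
      = d.modify g [] (fun l => l ++ [v]) := by
  by_cases hc : d.contains g = true
  · rw [PySem.Dict.contains_eq_isSome_get?] at hc
    obtain ⟨v', hv⟩ := Option.isSome_iff_exists.1 hc
    simp [hv]
  · have hnone : (d.get? g).isNone = true := by
      rw [PySem.Dict.contains_eq_isSome_get?] at hc
      simpa using hc
    rw [if_pos hnone]
    unfold PySem.Dict.modify
    rw [PySem.Dict.getD_insert_self, PySem.Dict.insert_insert_self,
      PySem.Dict.getD_of_not_contains d [] (by rw [PySem.Dict.contains_eq_isSome_get?]; simpa using hnone)]

-- the grouping loop threads the (path-compressed) parent map only through `find`,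
-- which returns roots and never changes them: the dict is the pure fold over the root function
theorem pvGroupFold_eq (rects : List (Int × Int × Int × Int)) :
    ∀ (l : List Nat) (P : Nat → Nat) (d : PySem.Dict Nat (List (Int × Int × Int × Int))),
      pvInv rects.length P →
      (l.foldl
          (fun (s : (Nat → Nat) × PySem.Dict Nat (List (Int × Int × Int × Int))) i =>
            let f := pvFindF rects.length s.1 i
            let g := f.2
            let d := if (s.2.get? g).isNone then s.2.insert g [] else s.2
            (f.1, d.modify g [] (fun l => l ++ [pvGetR rects i]))) (P, d)).2
        = l.foldl (fun d i => d.modify (pvRoot rects.length P i) [] (fun l => l ++ [pvGetR rects i])) d := by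
  intro l
  induction l with
  | nil => intro P d hP; rfl
  | cons i l ih =>
    intro P d hP
    obtain ⟨h1, h2, h3⟩ := pvFind_spec hP i
    simp only [List.foldl_cons]
    rw [show (let f := pvFindF rects.length P i
        let g := f.2
        let d' := if (d.get? g).isNone then d.insert g [] else d
        ((pvFindF rects.length P i).1, d'.modify g [] (fun l => l ++ [pvGetR rects i])))
      = ((pvFindF rects.length P i).1,
          d.modify (pvRoot rects.length P i) [] (fun l => l ++ [pvGetR rects i])) from by
        dsimp only
        rw [h1, pvDstep_eq]]
    rw [ih _ _ h2]
    apply PySem.List.foldl_congr_mem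
    intro d' j _
    rw [h3 j]

-- ---- bridge: the port's parent LIST simulates the parent function of the proofs ----
def pvToF (l : List Nat) : Nat → Nat := fun x => if x < l.length then l.getD x 0 else x

theorem pvToF_range (n : Nat) : pvToF (List.range n) = fun i => i := by
  funext x
  unfold pvToF
  split_ifs with h
  · rw [List.getD_eq_getElem?_getD, List.getElem?_range (by simpa using h)]
    rfl
  · rfl

theorem pvToF_get {l : List Nat} {i : Nat} (hi : i < l.length) : l.getD i 0 = pvToF l i := by
  unfold pvToF
  rw [if_pos hi]

theorem pvToF_set {l : List Nat} {i : Nat} (hi : i < l.length) (v : Nat) :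
    pvToF (l.set i v) = Function.update (pvToF l) i v := by
  funext x
  by_cases hx : x = i
  · subst hx
    rw [Function.update_self]
    unfold pvToF
    rw [List.length_set, if_pos hi]
    simp [List.getD_eq_getElem?_getD, List.getElem?_set, hi]
  · rw [Function.update_of_ne hx]
    unfold pvToF
    rw [List.length_set]
    by_cases hxl : x < l.length
    · rw [if_pos hxl, if_pos hxl]
      simp [List.getD_eq_getElem?_getD, List.getElem?_set, hx, Ne.symm hx]
    · rw [if_neg hxl, if_neg hxl]

theorem pvFindAux_sim : ∀ (fuel : Nat) (l : List Nat) (i : Nat),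
    pvInv l.length (pvToF l) → i < l.length →
    (pvFindAux l i fuel).1.length = l.length ∧
    pvToF (pvFindAux l i fuel).1 = (pvFindAuxF (pvToF l) i fuel).1 ∧
    (pvFindAux l i fuel).2 = (pvFindAuxF (pvToF l) i fuel).2 := by
  intro fuel
  induction fuel with
  | zero => intro l i _ _; exact ⟨rfl, rfl, rfl⟩
  | succ fuel ih =>
    intro l i hInv hi
    have hget : l.getD i 0 = pvToF l i := pvToF_get hi
    rw [pvFindAux, pvFindAuxF]
    by_cases hroot : pvToF l i = i
    · rw [if_pos (hget.trans hroot), if_pos hroot]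
      exact ⟨rfl, rfl, rfl⟩
    · rw [if_neg (fun hc => hroot (hget.symm.trans hc)), if_neg hroot]
      dsimp only
      have hPi : pvToF l i < l.length := hInv.2.1 i hi
      have hset_len : (l.set i (l.getD (l.getD i 0) 0)).length = l.length := List.length_set ..
      have hval : l.getD (l.getD i 0) 0 = pvToF l (pvToF l i) := by
        rw [hget]
        exact pvToF_get hPi
      have hsetF : pvToF (l.set i (l.getD (l.getD i 0) 0))
          = Function.update (pvToF l) i (pvToF l (pvToF l i)) := by
        rw [show l.set i (l.getD (l.getD i 0) 0) = l.set i (pvToF l (pvToF l i)) from by rw [hval],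
          pvToF_set hi]
      have hInv' : pvInv (l.set i (l.getD (l.getD i 0) 0)).length
          (pvToF (l.set i (l.getD (l.getD i 0) 0))) := by
        rw [hset_len, hsetF]
        exact pvInv_half hInv hroot
      have hidx : (l.set i (l.getD (l.getD i 0) 0)).getD i 0
          = Function.update (pvToF l) i (pvToF l (pvToF l i)) i := by
        rw [pvToF_get (show i < (l.set i (l.getD (l.getD i 0) 0)).length from by
          rw [hset_len]; exact hi), hsetF]
      have hidx_lt : (l.set i (l.getD (l.getD i 0) 0)).getD i 0
          < (l.set i (l.getD (l.getD i 0) 0)).length := by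
        rw [hidx, hset_len, Function.update_self]
        exact hInv.2.1 _ hPi
      obtain ⟨h1, h2, h3⟩ := ih (l.set i (l.getD (l.getD i 0) 0)) _ hInv' hidx_lt
      rw [hset_len] at h1
      refine ⟨h1, ?_, ?_⟩
      · rw [h2, hidx, hsetF]
      · rw [h3, hidx, hsetF]

theorem pvUnion_sim {n : Nat} {l : List Nat} {i j : Nat}
    (hlen : l.length = n) (hInv : pvInv n (pvToF l)) (hi : i < n) (hj : j < n) :
    (pvUnion n l i j).length = n ∧ pvToF (pvUnion n l i j) = pvUnionF n (pvToF l) i j := by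
  obtain ⟨hf1, hf2, hf3⟩ := pvFindAux_sim n l i (hlen ▸ hInv) (hlen ▸ hi)
  obtain ⟨hF2, hFInv, hFRoot⟩ := pvFind_spec hInv i
  have hInv1 : pvInv (pvFindAux l i n).1.length (pvToF (pvFindAux l i n).1) := by
    rw [hf1, hlen, hf2]
    exact hFInv
  have hj1 : j < (pvFindAux l i n).1.length := by rw [hf1, hlen]; exact hj
  obtain ⟨hg1, hg2, hg3⟩ := pvFindAux_sim n (pvFindAux l i n).1 j hInv1 hj1
  unfold pvUnion pvUnionF pvFind pvFindF
  dsimp only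
  have hcond : ((pvFindAux l i n).2 ≠ (pvFindAux (pvFindAux l i n).1 j n).2)
      ↔ ((pvFindAuxF (pvToF l) i n).2 ≠ (pvFindAuxF (pvFindAuxF (pvToF l) i n).1 j n).2) := by
    rw [hf3, hg3, hf2]
  by_cases hne : (pvFindAux l i n).2 ≠ (pvFindAux (pvFindAux l i n).1 j n).2
  · rw [if_pos hne, if_pos (hcond.1 hne)]
    have hroot_lt : (pvFindAux l i n).2 < (pvFindAux (pvFindAux l i n).1 j n).1.length := by
      rw [hg1, hf1, hlen, hf3]
      rw [show (pvFindAuxF (pvToF l) i n).2 = (pvFindF n (pvToF l) i).2 from rfl, hF2]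
      exact pvRoot_lt hInv hi
    constructor
    · rw [List.length_set, hg1, hf1, hlen]
    · rw [pvToF_set hroot_lt, hg2, hg3, hf2, hf3]
  · rw [if_neg hne, if_neg (fun hc => hne (hcond.2 hc))]
    exact ⟨hg1.trans (hf1.trans hlen), hg2.trans (by rw [hf2])⟩

theorem pvUfFold_sim {n : Nat} : ∀ (es : List (Nat × Nat)) (l : List Nat),
    l.length = n → pvInv n (pvToF l) → (∀ e ∈ es, e.1 < n ∧ e.2 < n) →
    (es.foldl (fun l e => pvUnion n l e.1 e.2) l).length = n ∧
    pvToF (es.foldl (fun l e => pvUnion n l e.1 e.2) l)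
      = es.foldl (fun P e => pvUnionF n P e.1 e.2) (pvToF l) := by
  intro es
  induction es with
  | nil => intro l h1 _ _; exact ⟨h1, rfl⟩
  | cons e es ih =>
    intro l hlen hInv hE
    have he := hE e (by simp)
    obtain ⟨hu1, hu2⟩ := pvUnion_sim hlen hInv he.1 he.2
    simp only [List.foldl_cons]
    obtain ⟨h1, h2⟩ := ih (pvUnion n l e.1 e.2) hu1
      (by rw [hu2]; exact pvUnion_inv hInv he.1 he.2) (fun e' he' => hE e' (by simp [he']))
    exact ⟨h1, by rw [h2, hu2]⟩

theorem pvGroupFold_sim (rects : List (Int × Int × Int × Int)) {n : Nat} :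
    ∀ (is : List Nat) (l : List Nat) (d : PySem.Dict Nat (List (Int × Int × Int × Int))),
    l.length = n → pvInv n (pvToF l) → (∀ i ∈ is, i < n) →
    (is.foldl (fun (s : List Nat × PySem.Dict Nat (List (Int × Int × Int × Int))) i =>
        let f := pvFind n s.1 i
        let g := f.2
        let d := if (s.2.get? g).isNone then s.2.insert g [] else s.2
        (f.1, d.modify g [] (fun l => l ++ [pvGetR rects i]))) (l, d)).2
      = (is.foldl (fun (s : (Nat → Nat) × PySem.Dict Nat (List (Int × Int × Int × Int))) i =>
        let f := pvFindF n s.1 i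
        let g := f.2
        let d := if (s.2.get? g).isNone then s.2.insert g [] else s.2
        (f.1, d.modify g [] (fun l => l ++ [pvGetR rects i]))) (pvToF l, d)).2 := by
  intro is
  induction is with
  | nil => intro l d _ _ _; rfl
  | cons i is ih =>
    intro l d hlen hInv his
    have hi : i < n := his i (by simp)
    obtain ⟨hf1, hf2, hf3⟩ := pvFindAux_sim n l i (hlen ▸ hInv) (hlen ▸ hi)
    obtain ⟨hF2, hFInv, hFRoot⟩ := pvFind_spec hInv i
    simp only [List.foldl_cons]
    rw [show (pvFind n l i).2 = (pvFindF n (pvToF l) i).2 from hf3]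
    rw [ih (pvFind n l i).1 _ (hf1.trans hlen) (show pvInv n (pvToF (pvFind n l i).1) from by
      rw [show pvToF (pvFind n l i).1 = (pvFindF n (pvToF l) i).1 from hf2]; exact hFInv)
      (fun i' hi' => his i' (by simp [hi']))]
    rw [show pvToF (pvFind n l i).1 = (pvFindF n (pvToF l) i).1 from hf2]

-- what A returns on a nonempty input: bounding boxes over the classes of pvRho,
-- one class per first occurrence of a root
theorem pvAval (rects : List (Int × Int × Int × Int)) (gap : Int) (hne : rects ≠ []) :
    merge_nearby_rects_py rects gap =
      (PySem.Set.ofList ((List.range rects.length).map (pvRho rects gap))).map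
        (fun c => pvBBoxA
          (((List.range rects.length).filter (fun i => pvRho rects gap i == c)).map (pvGetR rects))) := by
  obtain ⟨r, rs, rfl⟩ : ∃ r rs, rects = r :: rs := by
    cases rects with
    | nil => exact absurd rfl hne
    | cons r rs => exact ⟨r, rs, rfl⟩
  show (let n := (r :: rs).length
    let parent0 := List.range n
    let parent1 := (List.range n).foldl (fun parent i =>
        (List.range' (i+1) (n - (i+1))).foldl (fun parent j =>
            if pvClose (pvGetR (r :: rs) i) (pvGetR (r :: rs) j) gap then pvUnion n parent i j
            else parent) parent) parent0
    let s := (List.range n).foldl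
        (fun (s : List Nat × PySem.Dict Nat (List (Int × Int × Int × Int))) i =>
          let f := pvFind n s.1 i
          let g := f.2
          let d := if (s.2.get? g).isNone then s.2.insert g [] else s.2
          (f.1, d.modify g [] (fun l => l ++ [pvGetR (r :: rs) i])))
        (parent1, PySem.Dict.empty)
    s.2.values.map pvBBoxA) = _
  dsimp only
  rw [pvP1_eq (r :: rs) gap (fun parent i j => pvUnion (r :: rs).length parent i j)]
  have hlen0 : (List.range (r :: rs).length).length = (r :: rs).length := List.length_range ..
  have hInv0 : pvInv (r :: rs).length (pvToF (List.range (r :: rs).length)) := by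
    rw [pvToF_range]
    exact pvInv_id _
  obtain ⟨hL1, hF1⟩ := pvUfFold_sim (pvEdges (r :: rs) gap) (List.range (r :: rs).length)
    hlen0 hInv0 (pvEdges_lt _ gap)
  rw [pvToF_range] at hF1
  have hInv : pvInv (r :: rs).length
      ((pvEdges (r :: rs) gap).foldl (fun P e => pvUnionF (r :: rs).length P e.1 e.2) (fun i => i)) :=
    pvUfFold_inv _ _ (pvInv_id _) (pvEdges_lt _ gap)
  rw [pvGroupFold_sim (r :: rs) (List.range (r :: rs).length)
    ((pvEdges (r :: rs) gap).foldl (fun l e => pvUnion (r :: rs).length l e.1 e.2)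
      (List.range (r :: rs).length))
    PySem.Dict.empty hL1 (by rw [hF1]; exact hInv) (fun i hi => List.mem_range.1 hi)]
  rw [hF1]
  rw [pvGroupFold_eq (r :: rs) (List.range (r :: rs).length) _ PySem.Dict.empty hInv]
  have hkeys := PySem.Dict.keys_foldl_modify_key (List.range (r :: rs).length)
    (fun i => pvRho (r :: rs) gap i) []
    (fun _ i => fun l => l ++ [pvGetR (r :: rs) i]) (PySem.Dict.empty)
  have hnodup := PySem.Dict.nodup_keys_foldl_modify_key (List.range (r :: rs).length)
    (fun i => pvRho (r :: rs) gap i) []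
    (fun _ i => fun l => l ++ [pvGetR (r :: rs) i]) (PySem.Dict.empty) (by simp)
  have hvals := PySem.Dict.values_eq_map_keys _ hnodup ([] : List (Int × Int × Int × Int))
  have hrw : ∀ i, pvRoot (r :: rs).length
      (List.foldl (fun P e => pvUnionF (r :: rs).length P e.1 e.2) (fun i => i) (pvEdges (r :: rs) gap)) i
        = pvRho (r :: rs) gap i := fun _ => rfl
  simp only [hrw]
  dsimp only at hkeys hnodup hvals
  rw [hvals, hkeys]
  rw [PySem.Dict.keys_empty, PySem.Set.update_nil_left, List.map_map]
  apply List.map_congr_left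
  intro c hc
  simp only [Function.comp_apply]
  congr 1
  rw [show (List.foldl (fun d x => d.modify (pvRho (r :: rs) gap x) [] fun l => l ++ [pvGetR (r :: rs) x])
      PySem.Dict.empty (List.range (r :: rs).length))
    = (List.foldl (fun d (p : Nat × (Int × Int × Int × Int)) => d.modify p.1 [] fun l => l ++ [p.2])
      PySem.Dict.empty ((List.range (r :: rs).length).map (fun i => (pvRho (r :: rs) gap i, pvGetR (r :: rs) i)))) from by
    rw [List.foldl_map]]
  rw [PySem.Dict.getD_foldl_modify_append]
  rw [List.filter_map, List.map_map]
  simp only [Function.comp_def]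
  rfl

-- ---- B side: the propagation fixpoint computes the minimum index of each component ----

theorem pvFold_sticky (es : List (Nat × Nat)) (s : (Nat → Nat) × Bool) (h : s.2 = true) :
    (es.foldl pvStep s).2 = true := by
  induction es generalizing s with
  | nil => exact h
  | cons e es ih =>
    refine ih (pvStep s e) ?_
    unfold pvStep
    dsimp only
    split_ifs <;> simp [h]

theorem pvRound_false (es : List (Nat × Nat)) (lab : Nat → Nat)
    (h : (es.foldl pvStep (lab, false)).2 = false) :
    (es.foldl pvStep (lab, false)).1 = lab ∧ ∀ e ∈ es, lab e.1 = lab e.2 := by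
  induction es generalizing lab with
  | nil => exact ⟨rfl, by simp⟩
  | cons e es ih =>
    by_cases h1 : lab e.1 < lab e.2
    · exfalso
      have hstep : pvStep (lab, false) e = (Function.update lab e.2 (lab e.1), true) := by
        unfold pvStep; simp [h1]
      rw [List.foldl_cons, hstep, pvFold_sticky es _ rfl] at h
      exact absurd h (by decide)
    · by_cases h2 : lab e.2 < lab e.1
      · exfalso
        have hstep : pvStep (lab, false) e = (Function.update lab e.1 (lab e.2), true) := by
          unfold pvStep; simp [h1, h2]
        rw [List.foldl_cons, hstep, pvFold_sticky es _ rfl] at h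
        exact absurd h (by decide)
      · have heq : lab e.1 = lab e.2 := Nat.le_antisymm (Nat.le_of_not_lt h2) (Nat.le_of_not_lt h1)
        have hstep : pvStep (lab, false) e = (lab, false) := by
          unfold pvStep; simp [h1, h2]
        rw [List.foldl_cons, hstep] at h ⊢
        obtain ⟨ha, hb⟩ := ih lab h
        exact ⟨ha, fun e' he' => by
          rcases List.mem_cons.1 he' with rfl | hmem
          · exact heq
          · exact hb e' hmem⟩

theorem pvPropagate_inv {n : Nat} {es : List (Nat × Nat)} {hE : ∀ p ∈ es, p.1 < n ∧ p.2 < n}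
    (Q : (Nat → Nat) → Prop) (hstep : ∀ lab, Q lab → Q (pvRound es lab).1)
    (lab : Nat → Nat) (hQ : Q lab) : Q (pvPropagate n es hE lab) := by
  induction lab using pvPropagate.induct n es hE with
  | case1 lab h ih =>
    rw [pvPropagate, dif_pos h]
    exact ih (hstep lab hQ)
  | case2 lab h =>
    rw [pvPropagate, dif_neg h]
    exact hstep lab hQ

theorem pvPropagate_fixp {n : Nat} {es : List (Nat × Nat)} {hE : ∀ p ∈ es, p.1 < n ∧ p.2 < n}
    (lab : Nat → Nat) :
    ∀ e ∈ es, pvPropagate n es hE lab e.1 = pvPropagate n es hE lab e.2 := by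
  induction lab using pvPropagate.induct n es hE with
  | case1 lab h ih =>
    rw [pvPropagate, dif_pos h]
    exact ih
  | case2 lab h =>
    rw [pvPropagate, dif_neg h]
    obtain ⟨ha, hb⟩ := pvRound_false es lab (Bool.not_eq_true _ ▸ h)
    intro e he
    rw [show (pvRound es lab).1 = lab from ha]
    exact hb e he

theorem pvFoldStep_pres (rects : List (Int × Int × Int × Int)) (gap : Int) :
    ∀ (es : List (Nat × Nat)), (∀ e ∈ es, e ∈ pvEdges rects gap) →
      ∀ (s : (Nat → Nat) × Bool), (∀ x, s.1 x ≤ x) → (∀ x, pvConn rects gap (s.1 x) x) →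
      (∀ x, (es.foldl pvStep s).1 x ≤ x) ∧ (∀ x, pvConn rects gap ((es.foldl pvStep s).1 x) x) := by
  intro es
  induction es with
  | nil => intro _ s h1 h2; exact ⟨h1, h2⟩
  | cons e es ih =>
    intro hsub s h1 h2
    have heE : e ∈ pvEdges rects gap := hsub e (by simp)
    have hconn_e : pvConn rects gap e.1 e.2 := Relation.EqvGen.rel _ _ heE
    have hstep : (∀ x, (pvStep s e).1 x ≤ x) ∧ (∀ x, pvConn rects gap ((pvStep s e).1 x) x) := by
      unfold pvStep
      dsimp only
      split_ifs with ha hb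
      · constructor
        · intro x
          dsimp only
          rcases eq_or_ne x e.2 with rfl | hx
          · rw [Function.update_self]
            exact le_trans (Nat.le_of_lt ha) (h1 e.2)
          · rw [Function.update_of_ne hx]; exact h1 x
        · intro x
          dsimp only
          rcases eq_or_ne x e.2 with rfl | hx
          · rw [Function.update_self]
            exact Relation.EqvGen.trans _ _ _ (h2 e.1) hconn_e
          · rw [Function.update_of_ne hx]; exact h2 x
      · constructor
        · intro x
          dsimp only
          rcases eq_or_ne x e.1 with rfl | hx
          · rw [Function.update_self]
            exact le_trans (Nat.le_of_lt hb) (h1 e.1)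
          · rw [Function.update_of_ne hx]; exact h1 x
        · intro x
          dsimp only
          rcases eq_or_ne x e.1 with rfl | hx
          · rw [Function.update_self]
            exact Relation.EqvGen.trans _ _ _ (h2 e.2) (Relation.EqvGen.symm _ _ hconn_e)
          · rw [Function.update_of_ne hx]; exact h2 x
      · exact ⟨h1, h2⟩
    exact ih (fun e' he' => hsub e' (by simp [he'])) _ hstep.1 hstep.2

theorem pvLab_le_conn (rects : List (Int × Int × Int × Int)) (gap : Int) :
    (∀ x, pvLab rects gap x ≤ x) ∧ (∀ x, pvConn rects gap (pvLab rects gap x) x) := by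
  unfold pvLab
  refine pvPropagate_inv
    (fun lab => (∀ x, lab x ≤ x) ∧ (∀ x, pvConn rects gap (lab x) x)) ?_ _ ?_
  · intro lab h
    exact pvFoldStep_pres rects gap _ (fun e he => he) (lab, false) h.1 h.2
  · exact ⟨fun x => le_refl x, fun x => Relation.EqvGen.refl x⟩

theorem pvLab_edge (rects : List (Int × Int × Int × Int)) (gap : Int) :
    ∀ e ∈ pvEdges rects gap, pvLab rects gap e.1 = pvLab rects gap e.2 :=
  pvPropagate_fixp _

theorem pvLab_of_conn (rects : List (Int × Int × Int × Int)) (gap : Int) :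
    ∀ a b, pvConn rects gap a b → pvLab rects gap a = pvLab rects gap b := by
  intro a b h
  induction h with
  | rel x y hxy => exact pvLab_edge rects gap (x, y) hxy
  | refl x => rfl
  | symm x y _ ih => exact ih.symm
  | trans x y z _ _ ih1 ih2 => exact ih1.trans ih2

theorem pvLab_iff (rects : List (Int × Int × Int × Int)) (gap : Int) (a b : Nat) :
    pvLab rects gap a = pvLab rects gap b ↔ pvConn rects gap a b := by
  constructor
  · intro h
    have ha := (pvLab_le_conn rects gap).2 a
    have hb := (pvLab_le_conn rects gap).2 b
    refine Relation.EqvGen.trans _ _ _ (Relation.EqvGen.symm _ _ ha) ?_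
    rw [h]
    exact hb
  · exact pvLab_of_conn rects gap a b

theorem pvConn_equiv (rects : List (Int × Int × Int × Int)) (gap : Int) :
    Equivalence (pvConn rects gap) := Relation.EqvGen.is_equivalence _

theorem pvRho_iff (rects : List (Int × Int × Int × Int)) (gap : Int) (a b : Nat) :
    pvRho rects gap a = pvRho rects gap b ↔ pvConn rects gap a b := by
  constructor
  · intro h
    refine pvUfFold_sound (pvConn rects gap) (pvConn_equiv rects gap) (pvEdges rects gap)
      (fun e _he => Relation.EqvGen.rel _ _ (by simpa using _he)) (fun i => i) (pvInv_id _)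
      (pvEdges_lt rects gap) ?_ a b h
    intro a b hab
    rw [pvRoot_id, pvRoot_id] at hab
    rw [hab]
    exact Relation.EqvGen.refl b
  · intro h
    induction h with
    | rel x y hxy =>
      exact pvUfFold_complete (pvEdges rects gap) (fun i => i) (pvInv_id _)
        (pvEdges_lt rects gap) (x, y) hxy
    | refl x => rfl
    | symm x y _ ih => exact ih.symm
    | trans x y z _ _ ih1 ih2 => exact ih1.trans ih2

theorem pvRho_eq_lab (rects : List (Int × Int × Int × Int)) (gap : Int) (a b : Nat) :
    pvRho rects gap a = pvRho rects gap b ↔ pvLab rects gap a = pvLab rects gap b := by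
  rw [pvRho_iff, pvLab_iff]

-- ---- assembly ----

theorem pvBval (rects : List (Int × Int × Int × Int)) (gap : Int) :
    merge_nearby_rects_py_alt rects gap =
      ((List.range rects.length).filter (fun i => decide (pvLab rects gap i = i))).map
        (fun i => (List.range' (i+1) (rects.length - (i+1))).foldl
          (fun (s : Int × Int × Int × Int) j => if pvLab rects gap j = i then
            (min s.1 (pvGetR rects j).1, min s.2.1 (pvGetR rects j).2.1,
             max s.2.2.1 (pvGetR rects j).2.2.1, max s.2.2.2 (pvGetR rects j).2.2.2)
          else s) (pvGetR rects i)) := by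
  unfold merge_nearby_rects_py_alt
  dsimp only
  rw [show pvPropagate rects.length (pvEdges rects gap) (pvEdges_lt rects gap) (fun i => i)
      = pvLab rects gap from rfl]
  rw [PySem.List.foldl_append_ite (fun i => pvLab rects gap i = i)]
  rfl

theorem pvFold4 (g : Nat → Int × Int × Int × Int) (js : List Nat) :
    ∀ (r0 : Int × Int × Int × Int),
    js.foldl (fun s j => (min s.1 (g j).1, min s.2.1 (g j).2.1,
        max s.2.2.1 (g j).2.2.1, max s.2.2.2 (g j).2.2.2)) r0
      = ((js.map g).foldl (fun m r => min m r.1) r0.1,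
         (js.map g).foldl (fun m r => min m r.2.1) r0.2.1,
         (js.map g).foldl (fun m r => max m r.2.2.1) r0.2.2.1,
         (js.map g).foldl (fun m r => max m r.2.2.2) r0.2.2.2) := by
  induction js with
  | nil => intro r0; rfl
  | cons j js ih =>
    intro r0
    simp only [List.foldl_cons, List.map_cons]
    exact ih _

theorem pvReps (rects : List (Int × Int × Int × Int)) (gap : Int) :
    ∀ k, k ≤ rects.length →
      PySem.Set.ofList ((List.range k).map (pvRho rects gap)) =
        ((List.range k).filter (fun i => decide (pvLab rects gap i = i))).map (pvRho rects gap) := by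
  intro k
  induction k with
  | zero => intro _; rfl
  | succ k ih =>
    intro hk
    have hk' : k ≤ rects.length := Nat.le_of_succ_le hk
    rw [List.range_succ, List.map_append, List.filter_append,
      PySem.Set.ofList_eq_foldl, List.foldl_append, ← PySem.Set.ofList_eq_foldl]
    simp only [List.map_cons, List.map_nil, List.foldl_cons, List.foldl_nil, List.filter_cons,
      List.filter_nil]
    by_cases hLk : pvLab rects gap k = k
    · have hnotmem : pvRho rects gap k ∉ (List.range k).map (pvRho rects gap) := by
        intro hmem
        obtain ⟨j, hj, hje⟩ := List.mem_map.1 hmem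
        have hj' : j < k := List.mem_range.1 hj
        have : pvLab rects gap j = pvLab rects gap k := (pvRho_eq_lab rects gap j k).1 hje
        have hle := (pvLab_le_conn rects gap).1 j
        omega
      rw [PySem.Set.add_of_not_mem (fun hmem => hnotmem ((PySem.Set.mem_ofList _ _).1 hmem)), ih hk']
      simp [hLk]
    · have hmem : pvRho rects gap k ∈ (List.range k).map (pvRho rects gap) := by
        have hle := (pvLab_le_conn rects gap).1 k
        have hconn := (pvLab_le_conn rects gap).2 k
        refine List.mem_map.2 ⟨pvLab rects gap k, List.mem_range.2 (by omega), ?_⟩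
        refine (pvRho_eq_lab rects gap _ k).2 ?_
        exact pvLab_of_conn rects gap _ _ hconn
      rw [PySem.Set.add_of_mem ((PySem.Set.mem_ofList _ _).2 hmem), ih hk']
      simp [hLk]

theorem pvMembers (rects : List (Int × Int × Int × Int)) (gap : Int) (m : Nat)
    (hm : m < rects.length) (hLm : pvLab rects gap m = m) :
    (List.range rects.length).filter (fun i => pvRho rects gap i == pvRho rects gap m)
      = m :: (List.range' (m+1) (rects.length - (m+1))).filter
          (fun j => decide (pvLab rects gap j = m)) := by
  have hcongr : (List.range rects.length).filter (fun i => pvRho rects gap i == pvRho rects gap m)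
      = (List.range rects.length).filter (fun i => decide (pvLab rects gap i = m)) := by
    apply List.filter_congr
    intro i _
    have hiff : pvRho rects gap i = pvRho rects gap m ↔ pvLab rects gap i = m := by
      rw [pvRho_eq_lab, hLm]
    by_cases h : pvRho rects gap i = pvRho rects gap m
    · have h2 : pvLab rects gap i = m := hiff.1 h
      simp [h, h2]
    · have h2 : ¬ pvLab rects gap i = m := fun hc => h (hiff.2 hc)
      simp [h, h2]
  rw [hcongr]
  have hsplit : List.range rects.length
      = List.range (m+1) ++ List.range' (m+1) (rects.length - (m+1)) := by
    rw [List.range'_eq_map_range, ← List.range_add]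
    congr 1
    omega
  rw [hsplit, List.filter_append]
  have hfirst : (List.range (m+1)).filter (fun i => decide (pvLab rects gap i = m)) = [m] := by
    rw [List.range_succ, List.filter_append]
    have h1 : (List.range m).filter (fun i => decide (pvLab rects gap i = m)) = [] := by
      rw [List.filter_eq_nil_iff]
      intro i hi
      have hi' : i < m := List.mem_range.1 hi
      have hle := (pvLab_le_conn rects gap).1 i
      simp only [decide_eq_true_eq]
      omega
    rw [h1]
    simp [hLm]
  rw [hfirst]
  rfl

-- ===== VERDICT (by name: the statement is the Claim_ definition above) =====
theorem merge_nearby_rects_py_spec : Claim_equal_merge_nearby_rects_py := by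
  intro rects gap _hdom
  unfold Spec_merge_nearby_rects_py
  cases rects with
  | nil => rfl
  | cons r rs =>
    rw [pvAval (r :: rs) gap (by simp), pvBval]
    rw [pvReps (r :: rs) gap _ le_rfl, List.map_map]
    apply List.map_congr_left
    intro m hmem
    rw [List.mem_filter] at hmem
    have hm : m < (r :: rs).length := List.mem_range.1 hmem.1
    have hLm : pvLab (r :: rs) gap m = m := by simpa using hmem.2
    simp only [Function.comp_apply]
    rw [pvMembers (r :: rs) gap m hm hLm]
    rw [List.map_cons]
    rw [PySem.List.foldl_ite_eq_foldl_filter (fun j => pvLab (r :: rs) gap j = m)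
      (fun (s : Int × Int × Int × Int) j =>
        (min s.1 (pvGetR (r :: rs) j).1, min s.2.1 (pvGetR (r :: rs) j).2.1,
         max s.2.2.1 (pvGetR (r :: rs) j).2.2.1, max s.2.2.2 (pvGetR (r :: rs) j).2.2.2))]
    rw [pvFold4 (pvGetR (r :: rs))]
    rfl
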